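-- pv_equiv track=rewrite | github.com/sochic2/TIL | algorithm/201912/p_N으로표현.py | solution
-- ===== SOURCE A (Python) =====
-- def solution(N, number):
--     def make_number(cnt, num, arr):
--         if num >= 32000:
--             return
--         if num > 0:
--             if arr[num] < cnt or cnt > 9:
--                 return
--             if arr[num] > cnt:
--                 arr[num] = cnt
--
--         for i in range(1, 10 - cnt):
--             new_num = int(str(N) * i)
--             make_number(cnt + i, num * new_num, arr)
--             make_number(cnt + i, num + new_num, arr)
--             make_number(cnt + i, num - new_num, arr)
--             make_number(cnt + i, num // new_num, arr)
--
--     answer = -1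
--     arr = [987654321] * 34000
--     arr[N] = 1
--     make_number(1, 0, arr)
--     if arr[number] != 987654321:
--         answer = arr[number] - 1
--
--     return answer
-- ===== SOURCE B (Python) =====
-- def solution(N, number):
--     # Iterative DFS: explicit LIFO worklist instead of A's recursion, with the
--     # repdigits int(str(N)*i) precomputed once instead of at every node.
--     INF = 987654321
--     arr = [INF] * 34000
--     arr[N] = 1
--     reps = [int(str(N) * d) for d in range(1, 9)]
--     stack = [(1, 0)]
--     while stack:
--         cnt, num = stack.pop()
--         if num >= 32000:
--             continue
--         if num > 0:
--             if arr[num] < cnt or cnt > 9: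
--                 continue
--             if arr[num] > cnt:
--                 arr[num] = cnt
--         for i in range(9 - cnt, 0, -1):
--             a = reps[i - 1]
--             c = cnt + i
--             stack.append((c, num // a))
--             stack.append((c, num - a))
--             stack.append((c, num + a))
--             stack.append((c, num * a))
--     if arr[number] != INF:
--         return arr[number] - 1
--     return -1
-- ===== Notes on version B (the rewrite author's own statement) =====
-- stated objective: alternative
-- what changed: The recursive DFS is replaced by an iterative explicit-stack worklist (children pushed in reverse so the pop order equals A's call order) and the repdigits int(str(N)*i) are computed once up front instead of at every visited node.
import Mathlib
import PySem

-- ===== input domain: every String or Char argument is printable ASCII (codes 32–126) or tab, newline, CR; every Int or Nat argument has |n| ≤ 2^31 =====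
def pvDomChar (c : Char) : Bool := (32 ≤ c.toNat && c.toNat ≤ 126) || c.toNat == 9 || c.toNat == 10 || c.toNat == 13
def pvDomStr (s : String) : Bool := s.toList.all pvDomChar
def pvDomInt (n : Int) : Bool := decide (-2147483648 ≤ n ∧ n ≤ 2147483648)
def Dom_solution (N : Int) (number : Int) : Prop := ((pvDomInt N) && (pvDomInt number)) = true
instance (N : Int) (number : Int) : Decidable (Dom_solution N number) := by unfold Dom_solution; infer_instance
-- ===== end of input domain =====

-- B replaces A's recursive DFS by an explicit-stack worklist with the repdigits
-- precomputed once (objective: alternative decomposition; same visit order, same cost class).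

-- ===== shared primitive helpers (used by both ports) =====

-- str(N) * i  followed by  int(...): string repetition is (List.replicate i cs).flatten,
-- exact for i ≥ 0 (Python gives '' for i ≤ 0, as toNat does); int() is PySem.Int.ofChars?
-- (never none here for N ≥ 1, .getD 0 is the total form; inputs where it would be none are outside Pre_).
def pvRep (N : Int) (i : Int) : Int :=
  (PySem.Int.ofChars? ((List.replicate i.toNat (PySem.Int.toChars N)).flatten)).getD 0

-- arr[i] / arr[i] = v on the 34000-list: inside the search 0 < i < 32000, so plain Nat
-- indexing is exact; the defaults are never reached on inputs satisfying Pre_.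
def pvGetA (a : Array Int) (i : Int) : Int := a.getD i.toNat 0
def pvSetA (a : Array Int) (i : Int) (v : Int) : Array Int := a.setIfInBounds i.toNat v

-- Python negative-index wraparound for a list of length 34000 (exact for -34000 ≤ i ≤ 33999,
-- which Pre_ guarantees at the two places this is used).
def pvIndex (i : Int) : Int := if i < 0 then i + 34000 else i

-- ===== PORT A =====

-- make_number(cnt, num, arr): the fuel argument only makes the recursion structural;
-- the recursion depth is bounded (cnt ≥ 1 grows on every call, no call once cnt ≥ 9),
-- so fuel 10 is never exhausted from the top-level call.
def pvMake (N : Int) : Nat → Int → Int → Array Int → Array Int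
  | 0, _, _, arr => arr
  | fuel+1, cnt, num, arr =>
    if 32000 ≤ num then arr
    else if 0 < num ∧ (pvGetA arr num < cnt ∨ 9 < cnt) then arr
    else
      let arr1 := if 0 < num ∧ cnt < pvGetA arr num then pvSetA arr num cnt else arr
      (PySem.List.pyRange 1 (10 - cnt) 1).foldl (fun a i =>
        let nn := pvRep N i
        let a := pvMake N fuel (cnt + i) (num * nn) a
        let a := pvMake N fuel (cnt + i) (num + nn) a
        let a := pvMake N fuel (cnt + i) (num - nn) a
        pvMake N fuel (cnt + i) (PySem.Int.floordiv num nn) a) arr1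

def solution (N : Int) (number : Int) : Int :=
  let arr : Array Int := Array.replicate 34000 987654321
  let arr := pvSetA arr (pvIndex N) 1
  let arr := pvMake N 10 1 0 arr
  let answer : Int := -1
  if pvGetA arr (pvIndex number) ≠ 987654321 then pvGetA arr (pvIndex number) - 1 else answer

-- ===== PORT B =====

-- the while-loop of Source B; the stack is held top-first (Source B appends/pops at the END of a
-- Python list, which is the head here; the four appends per i become four conses, so the
-- innermost cons is Source B's last append = next pop).  The fuel only makes the loop
-- structural: 390625 steps are proved sufficient below.
def pvRun (N : Int) (reps : List Int) : Nat → List (Int × Int) → Array Int → Array Int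
  | 0, _, arr => arr
  | _+1, [], arr => arr
  | fuel+1, (cnt, num) :: s, arr =>
    if 32000 ≤ num then pvRun N reps fuel s arr
    else if 0 < num ∧ (pvGetA arr num < cnt ∨ 9 < cnt) then pvRun N reps fuel s arr
    else
      let arr1 := if 0 < num ∧ cnt < pvGetA arr num then pvSetA arr num cnt else arr
      let s1 := (PySem.List.pyRange (9 - cnt) 0 (-1)).foldl (fun st i =>
          let a := PySem.List.pyGetD reps (i - 1) 0
          let c := cnt + i
          (c, num * a) :: (c, num + a) :: (c, num - a) :: (c, PySem.Int.floordiv num a) :: st) s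
      pvRun N reps fuel s1 arr1

def solution_alt (N : Int) (number : Int) : Int :=
  let arr : Array Int := Array.replicate 34000 987654321
  let arr := pvSetA arr (pvIndex N) 1
  let reps := (PySem.List.pyRange 1 9 1).map (fun d => pvRep N d)
  let arr := pvRun N reps 390625 [(1, 0)] arr
  if pvGetA arr (pvIndex number) ≠ 987654321 then pvGetA arr (pvIndex number) - 1 else -1

-- ===== PRECONDITION & SPEC =====

-- Exactly the inputs on which the Python A returns: N ≤ 0 raises (ValueError from
-- int(str(N)*2), ZeroDivisionError for N = 0), N ≥ 34000 raises IndexError at arr[N] = 1,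
-- and number outside [-34000, 33999] raises IndexError at arr[number].
def Pre_solution (N : Int) (number : Int) : Prop :=
  (1 ≤ N ∧ N ≤ 33999) ∧ (-34000 ≤ number ∧ number ≤ 33999)
instance (N : Int) (number : Int) : Decidable (Pre_solution N number) := by
  unfold Pre_solution; infer_instance

def pvWitness_solution : Int × Int := (5, 12)

def Spec_solution (N : Int) (number : Int) (out : Int) : Prop := out = solution_alt N number
instance (N : Int) (number : Int) (out : Int) : Decidable (Spec_solution N number out) := by
  unfold Spec_solution; infer_instance

-- ===== CLAIM (what is proved, stated in full; the proofs are below) =====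
def Claim_equal_solution : Prop := ∀ (N : Int) (number : Int), Dom_solution N number → Pre_solution N number → Spec_solution N number (solution N number)

-- ===== LEMMAS AND PROOFS =====

-- weights: S d = sum_{j<d} W j and W d = 1 + 4 * S d, so a node with depth budget d weighs
-- strictly more than all of its (at most 4 per length, lengths 1..d) children together.
def pvS : Nat → Nat
  | 0 => 0
  | d+1 => 5 * pvS d + 1
def pvW (d : Nat) : Nat := 1 + 4 * pvS d
def pvWt (c : Int) : Nat := pvW (9 - c).toNat
def pvMsr (s : List (Int × Int)) : Nat := (s.map (fun p => pvWt p.1)).sum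

-- the four frames A's recursion launches for one i from a non-pruned node, in call order
def pvBlock (N : Int) (c n : Int) (i : Int) : List (Int × Int) :=
  [(c + i, n * pvRep N i), (c + i, n + pvRep N i),
   (c + i, n - pvRep N i), (c + i, PySem.Int.floordiv n (pvRep N i))]
def pvChildren (N : Int) (c n : Int) : List (Int × Int) :=
  (PySem.List.pyRange 1 (10 - c) 1).flatMap (pvBlock N c n)

-- A's recursion run over a list of frames, left to right
def pvDList (N : Int) (s : List (Int × Int)) (a : Array Int) : Array Int :=
  s.foldl (fun a p => pvMake N 10 p.1 p.2 a) a

lemma pvW_pos (d : Nat) : 1 ≤ pvW d := by simp [pvW]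

lemma pvMsr_append (x y : List (Int × Int)) : pvMsr (x ++ y) = pvMsr x + pvMsr y := by
  simp [pvMsr]

lemma pvDList_append (N : Int) (x y : List (Int × Int)) (a : Array Int) :
    pvDList N (x ++ y) a = pvDList N y (pvDList N x a) := by
  simp [pvDList, List.foldl_append]

-- unfolding equations restated for a variable-successor fuel (the ports use the literals 10/390625)
lemma pvMake_succ (N : Int) (f : Nat) (cnt num : Int) (arr : Array Int) :
    pvMake N (f+1) cnt num arr =
      if 32000 ≤ num then arr
      else if 0 < num ∧ (pvGetA arr num < cnt ∨ 9 < cnt) then arr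
      else
        (PySem.List.pyRange 1 (10 - cnt) 1).foldl (fun a i =>
          pvMake N f (cnt + i) (PySem.Int.floordiv num (pvRep N i))
            (pvMake N f (cnt + i) (num - pvRep N i)
              (pvMake N f (cnt + i) (num + pvRep N i)
                (pvMake N f (cnt + i) (num * pvRep N i) a))))
        (if 0 < num ∧ cnt < pvGetA arr num then pvSetA arr num cnt else arr) := rfl

lemma pvRun_succ_nil (N : Int) (reps : List Int) (f : Nat) (arr : Array Int) :
    pvRun N reps (f+1) [] arr = arr := rfl

lemma pvRun_succ_cons (N : Int) (reps : List Int) (f : Nat) (cnt num : Int)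
    (s : List (Int × Int)) (arr : Array Int) :
    pvRun N reps (f+1) ((cnt, num) :: s) arr =
      if 32000 ≤ num then pvRun N reps f s arr
      else if 0 < num ∧ (pvGetA arr num < cnt ∨ 9 < cnt) then pvRun N reps f s arr
      else pvRun N reps f
        ((PySem.List.pyRange (9 - cnt) 0 (-1)).foldl (fun st i =>
            (cnt + i, num * PySem.List.pyGetD reps (i - 1) 0) ::
            (cnt + i, num + PySem.List.pyGetD reps (i - 1) 0) ::
            (cnt + i, num - PySem.List.pyGetD reps (i - 1) 0) ::
            (cnt + i, PySem.Int.floordiv num (PySem.List.pyGetD reps (i - 1) 0)) :: st) s)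
        (if 0 < num ∧ cnt < pvGetA arr num then pvSetA arr num cnt else arr) := rfl

-- sum_{k<d} W (d-1-k) = S d
lemma pvSum_range_W (d : Nat) :
    ((List.range d).map (fun k => pvW (d - 1 - k))).sum = pvS d := by
  induction d with
  | zero => simp [pvS]
  | succ d ih =>
    rw [List.range_succ_eq_map, List.map_cons, List.sum_cons, List.map_map]
    have h2 : ((List.range d).map ((fun k => pvW (d + 1 - 1 - k)) ∘ Nat.succ))
        = (List.range d).map (fun k => pvW (d - 1 - k)) := by
      apply List.map_congr_left
      intro k _
      simp only [Function.comp]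
      congr 1
      omega
    rw [h2, ih]
    simp only [pvW, pvS, Nat.add_sub_cancel, Nat.sub_zero]
    omega

-- sum over i = 1..(9-c) of W (9-c-i) = S ((9-c).toNat)
lemma pvT (d : Nat) (c : Int) (hc : (9 - c).toNat = d) :
    ((PySem.List.pyRange 1 (10 - c) 1).map (fun i => pvW ((9 - (c + i)).toNat))).sum = pvS d := by
  rw [PySem.List.pyRange_one, List.map_map]
  have hd : (10 - c - 1).toNat = d := by omega
  rw [hd]
  have h2 : ((List.range d).map ((fun i => pvW ((9 - (c + i)).toNat)) ∘ (fun k : Nat => 1 + (k : Int))))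
      = (List.range d).map (fun k => pvW (d - 1 - k)) := by
    apply List.map_congr_left
    intro k hk
    have hk' : k < d := List.mem_range.1 hk
    simp only [Function.comp]
    congr 1
    omega
  rw [h2, pvSum_range_W]

lemma pvMsr_flatMap (g : Int → List (Int × Int)) (l : List Int) :
    pvMsr (l.flatMap g) = (l.map (fun i => pvMsr (g i))).sum := by
  induction l with
  | nil => simp [pvMsr]
  | cons x xs ih => simp [List.flatMap_cons, pvMsr_append, ih]

lemma pvMsr_children_lt (N c n : Int) : pvMsr (pvChildren N c n) < pvWt c := by
  unfold pvChildren
  rw [pvMsr_flatMap]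
  have h1 : ((PySem.List.pyRange 1 (10 - c) 1).map (fun i => pvMsr (pvBlock N c n i))).sum
      = ((PySem.List.pyRange 1 (10 - c) 1).map (fun i => 4 * pvW ((9 - (c + i)).toNat))).sum := by
    congr 1
    apply List.map_congr_left
    intro i _
    simp [pvMsr, pvBlock, pvWt]
    ring
  rw [h1, List.sum_map_mul_left, pvT (9 - c).toNat c rfl]
  simp only [pvWt, pvW]
  omega

-- membership bounds for the loop range
lemma pv_mem_range (c i : Int) (h : i ∈ PySem.List.pyRange 1 (10 - c) 1) : 1 ≤ i ∧ i < 10 - c :=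
  (PySem.List.mem_pyRange_one).1 h

-- pvMake does not depend on the fuel once the fuel exceeds the remaining depth
lemma pvMake_fuel (N : Int) : ∀ (f1 f2 : Nat) (c n : Int) (a : Array Int),
    (9 - c).toNat < f1 → (9 - c).toNat < f2 → pvMake N f1 c n a = pvMake N f2 c n a := by
  intro f1
  induction f1 with
  | zero => intro f2 c n a h1 _; omega
  | succ g1 ih =>
    intro f2 c n a h1 h2
    cases f2 with
    | zero => omega
    | succ g2 =>
      rw [pvMake_succ, pvMake_succ]
      congr 1
      congr 1
      apply PySem.List.foldl_congr_mem
      intro acc i hi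
      obtain ⟨hi1, hi2⟩ := pv_mem_range c i hi
      have e : ∀ (x : Int) (b : Array Int), pvMake N g1 (c + i) x b = pvMake N g2 (c + i) x b :=
        fun x b => ih g2 (c + i) x b (by omega) (by omega)
      simp only [e]

-- one step of A's recursion, with fuel 10, expressed through pvChildren
lemma pvMake_step (N c n : Int) (hc : 1 ≤ c) (a : Array Int) :
    pvMake N 10 c n a =
      if 32000 ≤ n then a
      else if 0 < n ∧ (pvGetA a n < c ∨ 9 < c) then a
      else pvDList N (pvChildren N c n)
        (if 0 < n ∧ c < pvGetA a n then pvSetA a n c else a) := by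
  rw [show (10:Nat) = 9+1 from rfl, pvMake_succ]
  congr 1
  congr 1
  unfold pvDList pvChildren
  rw [List.foldl_flatMap]
  apply PySem.List.foldl_congr_mem
  intro acc i hi
  obtain ⟨hi1, hi2⟩ := pv_mem_range c i hi
  have e : ∀ (x : Int) (b : Array Int), pvMake N 9 (c + i) x b = pvMake N 10 (c + i) x b :=
    fun x b => pvMake_fuel N 9 10 (c + i) x b (by omega) (by omega)
  simp only [pvBlock, List.foldl_cons, List.foldl_nil, e]

-- 'stack.foldr (push block) s = blocks ++ s' (foldr sibling of PySem.List.foldl_append_eq_flatMap;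
-- not in the library, so proved here)
lemma pvFoldr_flatMap (g : Int → List (Int × Int)) : ∀ (l : List Int) (s : List (Int × Int)),
    l.foldr (fun i st => g i ++ st) s = l.flatMap g ++ s := by
  intro l
  induction l with
  | nil => simp
  | cons x xs ih => intro s; simp [List.flatMap_cons, ih]

-- the stack produced by one pvRun step is pvChildren ++ s
lemma pvStack_step (N c n : Int) (hc : 1 ≤ c) (s : List (Int × Int)) :
    (PySem.List.pyRange (9 - c) 0 (-1)).foldl (fun st i =>
        (c + i, n * PySem.List.pyGetD ((PySem.List.pyRange 1 9 1).map (fun d => pvRep N d)) (i - 1) 0) ::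
        (c + i, n + PySem.List.pyGetD ((PySem.List.pyRange 1 9 1).map (fun d => pvRep N d)) (i - 1) 0) ::
        (c + i, n - PySem.List.pyGetD ((PySem.List.pyRange 1 9 1).map (fun d => pvRep N d)) (i - 1) 0) ::
        (c + i, PySem.Int.floordiv n (PySem.List.pyGetD ((PySem.List.pyRange 1 9 1).map (fun d => pvRep N d)) (i - 1) 0)) :: st) s
      = pvChildren N c n ++ s := by
  have hrev : PySem.List.pyRange (9 - c) 0 (-1) = (PySem.List.pyRange 1 (10 - c) 1).reverse := by
    rw [PySem.List.pyRange_neg_one_eq_reverse]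
    norm_num
    congr 1
    ring
  rw [hrev, List.foldl_reverse]
  have hrep : ∀ i, 1 ≤ i → i < 10 - c →
      PySem.List.pyGetD ((PySem.List.pyRange 1 9 1).map (fun d => pvRep N d)) (i - 1) 0 = pvRep N i := by
    intro i h1 h2
    have hi8 : i - 1 = (((i - 1).toNat : Nat) : Int) := by omega
    rw [hi8, PySem.List.pyGetD_map_pyRange_one (fun d => pvRep N d) 1 9 (i - 1).toNat 0 (by omega)]
    congr 1
    omega
  refine Eq.trans (b := (PySem.List.pyRange 1 (10 - c) 1).flatMap (fun i =>
      [(c + i, n * PySem.List.pyGetD ((PySem.List.pyRange 1 9 1).map (fun d => pvRep N d)) (i - 1) 0),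
       (c + i, n + PySem.List.pyGetD ((PySem.List.pyRange 1 9 1).map (fun d => pvRep N d)) (i - 1) 0),
       (c + i, n - PySem.List.pyGetD ((PySem.List.pyRange 1 9 1).map (fun d => pvRep N d)) (i - 1) 0),
       (c + i, PySem.Int.floordiv n (PySem.List.pyGetD ((PySem.List.pyRange 1 9 1).map (fun d => pvRep N d)) (i - 1) 0))]) ++ s) ?_ ?_
  · exact pvFoldr_flatMap (fun i =>
      [(c + i, n * PySem.List.pyGetD ((PySem.List.pyRange 1 9 1).map (fun d => pvRep N d)) (i - 1) 0),
       (c + i, n + PySem.List.pyGetD ((PySem.List.pyRange 1 9 1).map (fun d => pvRep N d)) (i - 1) 0),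
       (c + i, n - PySem.List.pyGetD ((PySem.List.pyRange 1 9 1).map (fun d => pvRep N d)) (i - 1) 0),
       (c + i, PySem.Int.floordiv n (PySem.List.pyGetD ((PySem.List.pyRange 1 9 1).map (fun d => pvRep N d)) (i - 1) 0))]) (PySem.List.pyRange 1 (10 - c) 1) s
  · congr 1
    unfold pvChildren
    simp only [List.flatMap_def]
    congr 1
    apply List.map_congr_left
    intro i hi
    obtain ⟨hi1, hi2⟩ := pv_mem_range c i hi
    rw [hrep i hi1 hi2]
    simp [pvBlock]

lemma pvMsr_cons (p : Int × Int) (t : List (Int × Int)) :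
    pvMsr (p :: t) = pvWt p.1 + pvMsr t := by
  simp [pvMsr]

-- main correspondence: the worklist run with sufficient fuel is A's recursion folded over
-- the stack, for any stack all of whose frames have cnt ≥ 1
lemma pvRun_eq_dList (N : Int) : ∀ (f : Nat) (s : List (Int × Int)) (a : Array Int),
    pvMsr s ≤ f → (∀ p ∈ s, 1 ≤ p.1) →
    pvRun N ((PySem.List.pyRange 1 9 1).map (fun d => pvRep N d)) f s a = pvDList N s a := by
  intro f
  induction f with
  | zero =>
    intro s a hm _
    cases s with
    | nil => simp [pvRun, pvDList]
    | cons p t =>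
      exfalso
      rw [pvMsr_cons] at hm
      have := pvW_pos (9 - p.1).toNat
      simp only [pvWt] at hm
      omega
  | succ f ih =>
    intro s a hm hmem
    cases s with
    | nil => simp [pvRun_succ_nil, pvDList]
    | cons p t =>
      obtain ⟨c, n⟩ := p
      have hc : 1 ≤ c := hmem (c, n) List.mem_cons_self
      have hmt : ∀ p ∈ t, 1 ≤ p.1 := fun p hp => hmem p (List.mem_cons_of_mem _ hp)
      rw [pvMsr_cons] at hm
      have hwc := pvW_pos (9 - c).toNat
      have hmt' : pvMsr t ≤ f := by simp only [pvWt] at hm ⊢; omega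
      have hDcons : pvDList N ((c, n) :: t) a = pvDList N t (pvMake N 10 c n a) := by
        simp [pvDList]
      rw [pvRun_succ_cons, hDcons, pvMake_step N c n hc a]
      by_cases h1 : 32000 ≤ n
      · simp only [if_pos h1]
        exact ih t a hmt' hmt
      · simp only [if_neg h1]
        by_cases h2 : 0 < n ∧ (pvGetA a n < c ∨ 9 < c)
        · simp only [if_pos h2]
          exact ih t a hmt' hmt
        · simp only [if_neg h2]
          rw [pvStack_step N c n hc t]
          have hmem' : ∀ p ∈ pvChildren N c n ++ t, 1 ≤ p.1 := by
            intro p hp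
            rcases List.mem_append.1 hp with hp | hp
            · unfold pvChildren at hp
              rcases List.mem_flatMap.1 hp with ⟨i, hi, hpi⟩
              obtain ⟨hi1, _⟩ := pv_mem_range c i hi
              simp only [pvBlock, List.mem_cons] at hpi
              rcases hpi with h | h | h | h | h <;> first | (subst h; simp; omega) | simp at h
            · exact hmt p hp
          have hm' : pvMsr (pvChildren N c n ++ t) ≤ f := by
            rw [pvMsr_append]
            have := pvMsr_children_lt N c n
            simp only [pvWt] at hm this ⊢
            omega
          rw [ih (pvChildren N c n ++ t) _ hm' hmem', pvDList_append]

-- ===== VERDICT (by name: the statement is the Claim_ definition above) =====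
theorem solution_spec : Claim_equal_solution := by
  intro N number _ _
  unfold Spec_solution solution solution_alt
  have h : ∀ X : Array Int, pvRun N ((PySem.List.pyRange 1 9 1).map (fun d => pvRep N d)) 390625 [(1, 0)] X
      = pvMake N 10 1 0 X := fun X =>
    (pvRun_eq_dList N 390625 [(1, 0)] X (by decide) (by simp)).trans (by simp [pvDList])
  dsimp only []
  rw [h]
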